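-- pv_equiv track=rewrite | github.com/samucj73/Roleta-web02 | app.py | evitar_sequencias_longas
-- ===== SOURCE A (Python) =====
-- def evitar_sequencias_longas(jogo, limite=4):
--     count = 1
--     for i in range(1, len(jogo)):
--         if jogo[i] == jogo[i-1] + 1:
--             count += 1
--             if count > limite:
--                 return False
--         else:
--             count = 1
--     return True
-- ===== SOURCE B (Python) =====
-- def _runs(jogo):
--     # lengths of the maximal runs of consecutive-by-one values
--     runs = []
--     i = 0
--     n = len(jogo)
--     while i < n:
--         j = i + 1
--         while j < n and jogo[j] == jogo[j - 1] + 1: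
--             j += 1
--         runs.append(j - i)
--         i = j
--     return runs
--
-- def evitar_sequencias_longas(jogo, limite=4):
--     # only actual sequences (runs of at least 2 consecutive numbers) are constrained
--     return all(r <= limite for r in _runs(jogo) if r > 1)
-- ===== Notes on version B (the rewrite author's own statement) =====
-- stated objective: alternative
-- what changed: B first decomposes the input into run lengths of consecutive-by-one values (a recursive partition) and then checks every run of length >= 2 against the limit, instead of A's single pass with an incremental counter and early exit.
import Mathlib
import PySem

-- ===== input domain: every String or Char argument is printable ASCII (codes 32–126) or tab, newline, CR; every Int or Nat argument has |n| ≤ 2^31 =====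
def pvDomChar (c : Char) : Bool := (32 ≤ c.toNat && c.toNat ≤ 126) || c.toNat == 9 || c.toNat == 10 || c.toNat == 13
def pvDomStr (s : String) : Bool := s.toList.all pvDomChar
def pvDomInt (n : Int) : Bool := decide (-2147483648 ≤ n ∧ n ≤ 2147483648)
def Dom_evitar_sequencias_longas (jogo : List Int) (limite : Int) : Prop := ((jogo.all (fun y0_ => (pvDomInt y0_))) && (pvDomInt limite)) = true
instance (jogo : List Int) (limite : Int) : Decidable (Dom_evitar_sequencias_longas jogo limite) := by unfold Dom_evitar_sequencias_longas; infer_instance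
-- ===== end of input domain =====

-- B partitions the list into consecutive-run lengths and checks them against the limit,
-- instead of A's incremental counter with early exit; same values, alternative decomposition.


-- ===== PORT A =====
-- A's for-loop over i = 1 .. len-1, carrying count; jogo[i-1] is carried as prev,
-- jogo[i] is the head of the remaining list (indices are always in range in A).
def pvEvitarLoop (limite : Int) (count : Int) (prev : Int) : List Int → Bool
  | [] => true
  | x :: xs =>
    if x = prev + 1 then
      if count + 1 > limite then false
      else pvEvitarLoop limite (count + 1) x xs
    else pvEvitarLoop limite 1 x xs

def evitar_sequencias_longas (jogo : List Int) (limite : Int) : Bool :=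
  match jogo with
  | [] => true
  | x :: xs => pvEvitarLoop limite 1 x xs

-- ===== PORT B =====
-- Source B's inner while loop: from a run's first element (prev), count how many further
-- elements continue it by +1; returns (that count, the remainder of the list).
def pvRunSplit (prev : Int) : List Int → Nat × List Int
  | [] => (0, [])
  | x :: xs =>
    if x = prev + 1 then
      let p := pvRunSplit x xs
      (p.1 + 1, p.2)
    else (0, x :: xs)

lemma pvRunSplit_length (prev : Int) (xs : List Int) :
    (pvRunSplit prev xs).2.length ≤ xs.length := by
  induction xs generalizing prev with
  | nil => simp [pvRunSplit]
  | cons x xs ih =>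
    by_cases h : x = prev + 1
    · simp only [pvRunSplit, if_pos h]
      exact le_trans (ih x) (Nat.le_succ _)
    · simp [pvRunSplit, h]

-- Source B's _runs: the outer while loop, one step per maximal run (run length = 1 + split count).
def pvRuns : List Int → List Int
  | [] => []
  | x :: xs =>
    let p := pvRunSplit x xs
    (((p.1 : Int) + 1)) :: pvRuns p.2
termination_by l => l.length
decreasing_by simpa using Nat.lt_succ_of_le (pvRunSplit_length x xs)

def evitar_sequencias_longas_alt (jogo : List Int) (limite : Int) : Bool :=
  ((pvRuns jogo).filter (fun r => decide (1 < r))).all (fun r => decide (r ≤ limite))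

-- ===== PRECONDITION & SPEC =====
def Spec_evitar_sequencias_longas (jogo : List Int) (limite : Int) (out : Bool) : Prop := out = evitar_sequencias_longas_alt jogo limite
instance (jogo : List Int) (limite : Int) (out : Bool) : Decidable (Spec_evitar_sequencias_longas jogo limite out) := by unfold Spec_evitar_sequencias_longas; infer_instance

-- ===== CLAIM (what is proved, stated in full; the proofs are below) =====
def Claim_equal_evitar_sequencias_longas : Prop := ∀ (jogo : List Int) (limite : Int), Dom_evitar_sequencias_longas jogo limite → Spec_evitar_sequencias_longas jogo limite (evitar_sequencias_longas jogo limite)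

-- ===== LEMMAS AND PROOFS =====

-- proof-side restatement of B's filtered `all`
def pvRunsOK (limite : Int) (rs : List Int) : Bool :=
  rs.all (fun r => decide (r ≤ 1) || decide (r ≤ limite))

lemma pvEvitarLoop_cons (limite count prev x : Int) (xs : List Int) :
    pvEvitarLoop limite count prev (x :: xs) =
      if x = prev + 1 then
        (if count + 1 > limite then false else pvEvitarLoop limite (count + 1) x xs)
      else pvEvitarLoop limite 1 x xs := rfl

lemma pvRuns_nil : pvRuns [] = [] := by rw [pvRuns]

lemma pvRuns_cons (x : Int) (xs : List Int) :
    pvRuns (x :: xs) = (((pvRunSplit x xs).1 : Int) + 1) :: pvRuns (pvRunSplit x xs).2 := by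
  rw [pvRuns]

lemma pvRuns_cons_cons (x y : Int) (ys : List Int) (r : Int) (rs : List Int)
    (hr : pvRuns (y :: ys) = r :: rs) :
    pvRuns (x :: y :: ys) = if y = x + 1 then (r + 1) :: rs else 1 :: r :: rs := by
  by_cases h : y = x + 1
  · rw [pvRuns_cons y ys] at hr
    rw [pvRuns_cons x (y :: ys)]
    simp only [pvRunSplit, if_pos h]
    injection hr with h1 h2
    rw [h2, ← h1]
    push_cast
    ring_nf
  · rw [pvRuns_cons x (y :: ys)]
    simp only [pvRunSplit, if_neg h]
    rw [hr]
    norm_num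

lemma pvRuns_shape (x : Int) (xs : List Int) :
    ∃ r rs, pvRuns (x :: xs) = r :: rs ∧ 1 ≤ r := by
  induction xs generalizing x with
  | nil => exact ⟨1, [], by simp [pvRuns_cons, pvRunSplit, pvRuns_nil], le_refl 1⟩
  | cons y ys ih =>
    obtain ⟨r, rs, hr, hr1⟩ := ih y
    by_cases h : y = x + 1
    · exact ⟨r + 1, rs, by rw [pvRuns_cons_cons x y ys r rs hr, if_pos h], by omega⟩
    · exact ⟨1, r :: rs, by rw [pvRuns_cons_cons x y ys r rs hr, if_neg h], le_refl 1⟩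

-- invariant: A's loop mid-run with `count` elements consumed equals B's check of the
-- runs of (prev :: xs), with the first run offset by count - 1.
lemma pvLoop_eq_runs (limite : Int) (xs : List Int) :
    ∀ prev count, pvEvitarLoop limite count prev xs =
      match pvRuns (prev :: xs) with
      | [] => true
      | r :: rs => (decide (r = 1) || decide (count + r - 1 ≤ limite)) && pvRunsOK limite rs := by
  induction xs with
  | nil => intro prev count; simp [pvEvitarLoop, pvRuns_cons, pvRunSplit, pvRuns_nil, pvRunsOK]
  | cons x xs ih =>
    intro prev count
    obtain ⟨r, rs, hr, hr1⟩ := pvRuns_shape x xs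
    rw [pvEvitarLoop_cons]
    by_cases h : x = prev + 1
    · rw [pvRuns_cons_cons prev x xs r rs hr, if_pos h, if_pos h]
      by_cases hc : count + 1 > limite
      · rw [if_pos hc]
        have h1 : ¬ (r + 1 = 1) := by omega
        have h2 : ¬ (count + (r + 1) - 1 ≤ limite) := by omega
        simp [h1, h2]
      · rw [if_neg hc, ih x (count + 1), hr]
        by_cases he : r = 1
        · simp [he]
          intro _
          omega
        · have h4 : ¬ (r + 1 = 1) := by omega
          have h5 : (count + (r + 1) - 1 ≤ limite) ↔ (count + 1 + r - 1 ≤ limite) := by omega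
          simp [he, h4, h5]
    · rw [pvRuns_cons_cons prev x xs r rs hr, if_neg h, if_neg h, ih x 1, hr]
      have he : (r = 1) ↔ (r ≤ 1) := by omega
      have h6 : (1 + r - 1 ≤ limite) ↔ (r ≤ limite) := by omega
      simp [pvRunsOK, he]

lemma pvAlt_eq_runsOK (jogo : List Int) (limite : Int) :
    evitar_sequencias_longas_alt jogo limite = pvRunsOK limite (pvRuns jogo) := by
  unfold evitar_sequencias_longas_alt pvRunsOK
  induction pvRuns jogo with
  | nil => rfl
  | cons r rs ih =>
    by_cases h : 1 < r
    · have h1 : ¬ (r ≤ 1) := by omega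
      simp [List.filter, List.all, h, h1, ih]
    · have h1 : r ≤ 1 := by omega
      simp [List.filter, List.all, h, h1, ih]

-- ===== VERDICT (by name: the statement is the Claim_ definition above) =====
theorem evitar_sequencias_longas_spec : Claim_equal_evitar_sequencias_longas := by
  intro jogo limite _
  unfold Spec_evitar_sequencias_longas
  rw [pvAlt_eq_runsOK]
  match jogo with
  | [] => rw [pvRuns_nil]; rfl
  | x :: xs =>
    obtain ⟨r, rs, hr, hr1⟩ := pvRuns_shape x xs
    show pvEvitarLoop limite 1 x xs = _
    rw [pvLoop_eq_runs, hr]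
    have he : (r = 1) ↔ (r ≤ 1) := by omega
    have h6 : (1 + r - 1 ≤ limite) ↔ (r ≤ limite) := by omega
    simp [pvRunsOK, he]
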